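-- pv_equiv track=rewrite | github.com/frek818/advent-of-code | solutions/2022/08/python/solution.py | filter_incrementing_indexes
-- ===== SOURCE A (Python) =====
-- def filter_incrementing_indexes(items):
--     incrementing = [0]
--     previous = items[0]
--     for i in range(1, len(items)):
--         if items[i] > previous:
--             incrementing.append(i)
--             previous = items[i]
--     return incrementing
-- ===== SOURCE B (Python) =====
-- def filter_incrementing_indexes(items):
--     m = items[0]
--     run = []
--     for x in items:
--         m = max(m, x)
--         run.append(m)
--     return [0] + [i for i in range(1, len(run)) if run[i] > run[i-1]]
-- ===== Notes on version B (the rewrite author's own statement) =====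
-- stated objective: alternative
-- what changed: Replaced the fused scan with a tracked previous value by two differently-shaped passes: first build the running-maximum prefix table, then emit index 0 followed by every index whose table entry strictly exceeds the previous entry.
import Mathlib
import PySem

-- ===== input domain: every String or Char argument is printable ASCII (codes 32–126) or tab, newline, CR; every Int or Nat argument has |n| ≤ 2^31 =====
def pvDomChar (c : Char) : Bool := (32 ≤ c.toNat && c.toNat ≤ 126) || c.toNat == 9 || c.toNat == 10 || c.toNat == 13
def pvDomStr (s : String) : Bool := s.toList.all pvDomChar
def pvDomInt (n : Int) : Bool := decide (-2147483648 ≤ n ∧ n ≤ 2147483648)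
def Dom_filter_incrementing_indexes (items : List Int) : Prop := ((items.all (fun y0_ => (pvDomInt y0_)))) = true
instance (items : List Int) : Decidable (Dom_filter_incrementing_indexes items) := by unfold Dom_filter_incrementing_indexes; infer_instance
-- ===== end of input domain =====

-- B builds a running-maximum prefix table then compares adjacent entries (two passes),
-- instead of A's single fused scan with a tracked previous value; objective: alternative.


-- ===== PORT A =====
-- literal port of A: state (incrementing, previous), loop over range(1, len(items));
-- items[i] is always in range inside the loop, so pyGetD is exact there.
def filter_incrementing_indexes (items : List Int) : List Int :=
  match PySem.List.pyGet? items 0 with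
  | none => []      -- Python raises IndexError here; excluded by Pre_
  | some p0 =>
    ((PySem.List.pyRange 1 (items.length : Int) 1).foldl
      (fun (st : List Int × Int) i =>
        if PySem.List.pyGetD items i 0 > st.2 then
          (st.1 ++ [i], PySem.List.pyGetD items i 0)
        else st)
      ([0], p0)).1

-- ===== PORT B =====
-- literal port of B: build run = running maxima (one pass), then the comprehension
-- [i for i in range(1, len(run)) if run[i] > run[i-1]]; indices always in range, pyGetD exact.
def filter_incrementing_indexes_alt (items : List Int) : List Int :=
  match PySem.List.pyGet? items 0 with
  | none => []      -- Python raises IndexError here; excluded by Pre_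
  | some m0 =>
    let run := (items.foldl
      (fun (st : Int × List Int) x => (max st.1 x, st.2 ++ [max st.1 x]))
      (m0, [])).2
    [0] ++ (PySem.List.pyRange 1 (run.length : Int) 1).filter
      (fun i => PySem.List.pyGetD run i 0 > PySem.List.pyGetD run (i - 1) 0)

-- ===== PRECONDITION & SPEC =====
-- A raises IndexError on the empty list (its first-element access); so does B. Pre_ excludes exactly that.
def Pre_filter_incrementing_indexes (items : List Int) : Prop := items ≠ []
instance (items : List Int) : Decidable (Pre_filter_incrementing_indexes items) := by
  unfold Pre_filter_incrementing_indexes; infer_instance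
def pvWitness_filter_incrementing_indexes : List Int := [3, 1, 4, 1, 5]

def Spec_filter_incrementing_indexes (items : List Int) (out : List Int) : Prop := out = filter_incrementing_indexes_alt items
instance (items : List Int) (out : List Int) : Decidable (Spec_filter_incrementing_indexes items out) := by unfold Spec_filter_incrementing_indexes; infer_instance

-- ===== CLAIM (what is proved, stated in full; the proofs are below) =====
def Claim_equal_filter_incrementing_indexes : Prop := ∀ (items : List Int), Dom_filter_incrementing_indexes items → Pre_filter_incrementing_indexes items → Spec_filter_incrementing_indexes items (filter_incrementing_indexes items)

-- ===== LEMMAS AND PROOFS =====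

-- canonical recursive form: indexes of strict new running maxima of the tail, starting at index i
def pvGo (prev : Int) (i : Int) : List Int → List Int
  | [] => []
  | x :: xs => if x > prev then i :: pvGo x (i + 1) xs else pvGo prev (i + 1) xs

-- running maxima sequence
def pvScanMax (m : Int) : List Int → List Int
  | [] => []
  | x :: xs => max m x :: pvScanMax (max m x) xs

-- indexes (starting at i for the first adjacent pair) where the entry strictly exceeds its predecessor
def pvAdj (i : Int) : List Int → List Int
  | a :: b :: rest => (if b > a then [i] else []) ++ pvAdj (i + 1) (b :: rest)
  | _ => []

theorem pvAdj_short (i : Int) (l : List Int) (h : l.length ≤ 1) : pvAdj i l = [] := by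
  match l with
  | [] => rfl
  | [a] => rfl
  | a :: b :: rest => simp at h

-- B's inner foldl builds exactly the running-maxima list
theorem pvRun_eq (l : List Int) (m : Int) (acc : List Int) :
    (l.foldl (fun (st : Int × List Int) x => (max st.1 x, st.2 ++ [max st.1 x])) (m, acc))
      = (l.foldl (fun m x => max m x) m, acc ++ pvScanMax m l) := by
  induction l generalizing m acc with
  | nil => simp [pvScanMax]
  | cons x xs ih => simp [List.foldl, pvScanMax, ih]

-- the adjacent-growth indexes of prev :: scanMax prev tail are the new-maximum indexes of tail
theorem pvAdj_scanMax (tail : List Int) (prev : Int) (i : Int) :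
    pvAdj i (prev :: pvScanMax prev tail) = pvGo prev i tail := by
  induction tail generalizing prev i with
  | nil => rfl
  | cons x xs ih =>
    simp only [pvScanMax, pvAdj, pvGo]
    by_cases h : x > prev
    · have hm : max prev x = x := by omega
      simp [h, hm, ih]
    · have hm : max prev x = prev := by omega
      simp [h, hm, ih]

-- A's foldl over range(k, len) equals pvGo on the dropped suffix
theorem pvA_loop (m : Nat) : ∀ (k : Nat) (items acc : List Int) (prev : Int),
    1 ≤ k → items.length ≤ k + m →
    ((PySem.List.pyRange (k : Int) (items.length : Int) 1).foldl
      (fun (st : List Int × Int) i =>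
        if PySem.List.pyGetD items i 0 > st.2 then
          (st.1 ++ [i], PySem.List.pyGetD items i 0)
        else st)
      (acc, prev)).1 = acc ++ pvGo prev (k : Int) (items.drop k) := by
  induction m with
  | zero =>
    intro k items acc prev hk hlen
    have h1 : (items.length : Int) ≤ (k : Int) := by exact_mod_cast hlen
    rw [PySem.List.pyRange_one_eq_nil h1]
    have : items.drop k = [] := by
      apply List.drop_eq_nil_of_le; omega
    simp [this, pvGo]
  | succ m ih =>
    intro k items acc prev hk hlen
    by_cases hkl : k < items.length
    · have hkl' : ((k : Int)) < (items.length : Int) := by exact_mod_cast hkl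
      rw [PySem.List.pyRange_one_cons hkl']
      have hget : PySem.List.pyGetD items (k : Int) 0 = items[k] := by
        rw [PySem.List.pyGetD_natCast]
        simp [List.getD, hkl]
      have hdrop : items.drop k = items[k] :: items.drop (k + 1) :=
        List.drop_eq_getElem_cons hkl
      have hcast : ((k : Int)) + 1 = ((k + 1 : Nat) : Int) := by push_cast; ring
      simp only [List.foldl_cons, hget]
      by_cases hgt : items[k] > prev
      · rw [if_pos hgt, hcast, ih (k + 1) items (acc ++ [(k : Int)]) items[k] (by omega) (by omega)]
        simp only [hdrop, pvGo, if_pos hgt, Nat.cast_add, Nat.cast_one,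
          List.append_assoc, List.singleton_append]
      · rw [if_neg hgt, hcast, ih (k + 1) items acc prev (by omega) (by omega)]
        simp only [hdrop, pvGo, if_neg hgt, Nat.cast_add, Nat.cast_one]
    · have h1 : (items.length : Int) ≤ (k : Int) := by exact_mod_cast Nat.le_of_not_lt hkl
      rw [PySem.List.pyRange_one_eq_nil h1]
      have : items.drop k = [] := List.drop_eq_nil_of_le (by omega)
      simp [this, pvGo]

-- B's filtered range over run equals pvAdj on the dropped suffix
theorem pvB_loop (m : Nat) : ∀ (k : Nat) (R : List Int),
    1 ≤ k → R.length ≤ k + m →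
    (PySem.List.pyRange (k : Int) (R.length : Int) 1).filter
      (fun i => PySem.List.pyGetD R i 0 > PySem.List.pyGetD R (i - 1) 0)
      = pvAdj (k : Int) (R.drop (k - 1)) := by
  induction m with
  | zero =>
    intro k R hk hlen
    have h1 : (R.length : Int) ≤ (k : Int) := by exact_mod_cast hlen
    rw [PySem.List.pyRange_one_eq_nil h1]
    rw [pvAdj_short _ _ (by simp [List.length_drop]; omega)]
    rfl
  | succ m ih =>
    intro k R hk hlen
    by_cases hkl : k < R.length
    · have hkl' : ((k : Int)) < (R.length : Int) := by exact_mod_cast hkl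
      rw [PySem.List.pyRange_one_cons hkl']
      have hgetk : PySem.List.pyGetD R (k : Int) 0 = R[k] := by
        rw [PySem.List.pyGetD_natCast]; simp [List.getD, hkl]
      have hk1 : ((k : Int)) - 1 = ((k - 1 : Nat) : Int) := by
        have : 1 ≤ k := hk; push_cast [this]; ring
      have hgetk1 : PySem.List.pyGetD R ((k : Int) - 1) 0 = R[k - 1] := by
        rw [hk1, PySem.List.pyGetD_natCast]; simp [List.getD, show k - 1 < R.length by omega]
      have hdrop1 : R.drop (k - 1) = R[k - 1] :: R.drop k := by
        have h0 := List.drop_eq_getElem_cons (l := R) (i := k - 1) (by omega)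
        rwa [show k - 1 + 1 = k by omega] at h0
      have hdrop2 : R.drop k = R[k] :: R.drop (k + 1) :=
        List.drop_eq_getElem_cons hkl
      have hcast : ((k : Int)) + 1 = ((k + 1 : Nat) : Int) := by push_cast; ring
      have hsub : (k + 1) - 1 = k := by omega
      rw [List.filter_cons]
      have ihk := ih (k + 1) R (by omega) (by omega)
      rw [hsub] at ihk
      by_cases hgt : R[k] > R[k - 1]
      · simp only [hgetk, hgetk1, hgt, decide_true, if_pos]
        rw [hcast, ihk, hdrop1, hdrop2]
        simp only [pvAdj, if_pos hgt, Nat.cast_add, Nat.cast_one, List.singleton_append]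
      · simp only [hgetk, hgetk1, hgt, decide_false, if_neg, Bool.false_eq_true,
          not_false_eq_true]
        rw [hcast, ihk, hdrop1, hdrop2]
        simp only [pvAdj, if_neg hgt, Nat.cast_add, Nat.cast_one, List.nil_append]
    · have h1 : (R.length : Int) ≤ (k : Int) := by exact_mod_cast Nat.le_of_not_lt hkl
      rw [PySem.List.pyRange_one_eq_nil h1]
      rw [pvAdj_short _ _ (by simp [List.length_drop]; omega)]
      rfl

-- ===== VERDICT (by name: the statement is the Claim_ definition above) =====
theorem filter_incrementing_indexes_spec : Claim_equal_filter_incrementing_indexes := by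
  intro items _ hpre
  unfold Spec_filter_incrementing_indexes
  match items, hpre with
  | h :: tail, _ =>
    unfold filter_incrementing_indexes filter_incrementing_indexes_alt
    rw [PySem.List.pyGet?_zero_cons]
    simp only
    have hA := pvA_loop (h :: tail).length 1 (h :: tail) [0] h (le_refl 1) (by omega)
    rw [Nat.cast_one] at hA
    rw [hA]
    rw [pvRun_eq]
    have hrun : pvScanMax h (h :: tail) = h :: pvScanMax h tail := by
      simp [pvScanMax]
    rw [List.nil_append, hrun]
    have hB := pvB_loop (h :: pvScanMax h tail).length 1 (h :: pvScanMax h tail) (le_refl 1) (by omega)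
    rw [Nat.cast_one] at hB
    rw [hB]
    simp only [Nat.sub_self, List.drop_zero]
    rw [pvAdj_scanMax]
    simp
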